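-- pv_equiv track=rewrite | github.com/rabiNyoom/Ege-Inf_2025-2026 | Решу ЕГЭ/Январь/12/12_3.py | tm
-- ===== SOURCE A (Python) =====
-- cmd_map = {
--     (' ', 0): (' ', -1, 1),
--     (' ', 1): (' ', None, 1),
--
--     ('0', 1): ('1', -1, 1),
--
--     ('1', 1): ('0', None, 1),
-- }
--
-- def tm(n: str) -> str:
--     s = list(' ' + n + ' ')
--     i = len(s) - 1
--     q = 0
--
--     while True:
--         char, mov, state = cmd_map[s[i], q]
--         s[i] = char
--         if mov is None:
--             break
--         i += mov
--         q = state
--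
--     return ''.join(s)
-- ===== SOURCE B (Python) =====
-- def tm(n: str) -> str:
--     # closed form: the machine turns every trailing '0' into '1', then flips the
--     # rightmost non-'0' char if it is '1' (otherwise halts leaving it unchanged).
--     stripped = n.rstrip('0')
--     ones = '1' * (len(n) - len(stripped))
--     if not stripped:
--         return ' ' + ones + ' '
--     stop = '0' if stripped[-1] == '1' else stripped[-1]
--     return ' ' + stripped[:-1] + stop + ones + ' '
-- ===== Notes on version B (the rewrite author's own statement) =====
-- stated objective: simpler
-- what changed: Replaces the transition-table Turing-machine head simulation (mutable tape, head index, state register) with a closed-form string rewrite: strip trailing zeros, turn them into ones, and flip the rightmost remaining char if it is '1'.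
import Mathlib
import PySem

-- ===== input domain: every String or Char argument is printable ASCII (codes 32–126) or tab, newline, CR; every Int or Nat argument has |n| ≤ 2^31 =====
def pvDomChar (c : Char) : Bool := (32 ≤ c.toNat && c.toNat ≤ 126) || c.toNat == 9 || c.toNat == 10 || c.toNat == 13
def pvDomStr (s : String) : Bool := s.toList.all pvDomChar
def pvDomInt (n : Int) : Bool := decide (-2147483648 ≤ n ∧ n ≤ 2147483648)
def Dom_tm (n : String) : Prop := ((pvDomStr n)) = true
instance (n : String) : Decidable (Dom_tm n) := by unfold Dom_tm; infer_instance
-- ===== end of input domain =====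

-- B drops A's transition table and head simulation for a closed-form rewrite of the string;
-- objective: simpler. A raises KeyError on stop characters outside the table; those inputs are outside Pre_.

-- ===== PORT A =====
-- the cmd_map dict: key (tape char, state), value (new char, move | None, new state)
def cmdMap : PySem.Dict (Char × Int) (Char × Option Int × Int) :=
  PySem.Dict.ofList
    [ ((' ', 0), (' ', some (-1), 1))
    , ((' ', 1), (' ', none, 1))
    , (('0', 1), ('1', some (-1), 1))
    , (('1', 1), ('0', none, 1)) ]

-- the 'while True' loop; fuel bounds the steps (the head only moves left, so
-- s.length + 1 steps always suffice); a cmd_map miss (Python KeyError) returns the tape as-is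
-- and is excluded by Pre_tm.
def tmLoop (fuel : Nat) (s : List Char) (i : Int) (q : Int) : List Char :=
  match fuel with
  | 0 => s
  | fuel + 1 =>
    match PySem.List.pyGet? s i with
    | none => s          -- IndexError: unreachable from tm's initial state
    | some c =>
      match cmdMap.get? (c, q) with
      | none => s        -- KeyError: outside Pre_tm
      | some (ch, mov, state) =>
        let s' := PySem.List.pySetD s i ch   -- s[i] = char (index known in range: pyGet? succeeded)
        match mov with
        | none => s'
        | some m => tmLoop fuel s' (i + m) state

def tm (n : String) : String :=
  let s := (' ' :: n.toList) ++ [' ']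
  String.ofList (tmLoop (s.length + 1) s ((s.length : Int) - 1) 0)

-- ===== PORT B =====
def tm_alt (n : String) : String :=
  let l := n.toList
  let stripped := (l.reverse.dropWhile (· = '0')).reverse   -- n.rstrip('0'), exact
  let ones := List.replicate (l.length - stripped.length) '1'
  match stripped.getLast? with
  | none => String.ofList (' ' :: (ones ++ [' ']))
  | some c =>
    let stop := if c = '1' then '0' else c
    String.ofList (' ' :: (stripped.dropLast ++ stop :: (ones ++ [' '])))

-- ===== PRECONDITION & SPEC =====
-- Pre_tm: the rightmost non-'0' character of n, if any, is '1' or ' ' — exactly the inputs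
-- on which A's cmd_map lookups all succeed (otherwise A raises KeyError).
def Pre_tm (n : String) : Prop :=
  (n.toList.reverse.dropWhile (· = '0')).headD '1' = '1' ∨
  (n.toList.reverse.dropWhile (· = '0')).headD '1' = ' '
instance (n : String) : Decidable (Pre_tm n) := by unfold Pre_tm; infer_instance

def pvWitness_tm : String := "10"

def Spec_tm (n : String) (out : String) : Prop := out = tm_alt n
instance (n : String) (out : String) : Decidable (Spec_tm n out) := by unfold Spec_tm; infer_instance

-- ===== CLAIM (what is proved, stated in full; the proofs are below) =====
def Claim_equal_tm : Prop := ∀ (n : String), Dom_tm n → Pre_tm n → Spec_tm n (tm n)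

-- ===== LEMMAS AND PROOFS =====

-- setting the cell just after a prefix w
theorem set_mid {α : Type} (w : List α) (c : α) (v : List α) (d : α) :
    (w ++ c :: v).set w.length d = w ++ d :: v := by
  induction w with
  | nil => rfl
  | cons x xs ih => simp [ih]

theorem pyGet_mid {α : Type} (w : List α) (c : α) (v : List α) :
    PySem.List.pyGet? (w ++ c :: v) (w.length : Int) = some c := by
  rw [PySem.List.pyGet?_natCast]
  simp

theorem pySetD_mid {α : Type} (w : List α) (c : α) (v : List α) (d : α) :
    PySem.List.pySetD (w ++ c :: v) (w.length : Int) d = w ++ d :: v := by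
  rw [PySem.List.pySetD_natCast]
  exact set_mid w c v d

-- the machine in state 1, head on the cell holding c (preceded by w), then k zeros, suffix v inert
theorem loop1 (k : Nat) : ∀ (w : List Char) (c : Char) (v : List Char) (fuel : Nat),
    k < fuel → (c = '1' ∨ c = ' ') →
    tmLoop fuel ((w ++ [c]) ++ List.replicate k '0' ++ v) ((w.length + k : Nat) : Int) 1 =
      w ++ (if c = '1' then '0' else c) :: (List.replicate k '1' ++ v) := by
  induction k with
  | zero =>
    intro w c v fuel hf hstop
    obtain ⟨fuel, rfl⟩ : ∃ f, fuel = f + 1 := ⟨fuel - 1, by omega⟩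
    have hdecomp : (w ++ [c]) ++ List.replicate 0 '0' ++ v = w ++ c :: v := by simp
    have hidx : ((w.length + 0 : Nat) : Int) = (w.length : Int) := by simp
    rw [hdecomp, hidx, tmLoop, pyGet_mid]
    rcases hstop with h1 | h1 <;> subst h1
    · simp only []
      rw [show cmdMap.get? ('1', 1) = some ('0', none, 1) from by decide]
      simp
    · simp only []
      rw [show cmdMap.get? (' ', 1) = some (' ', none, 1) from by decide]
      simp
  | succ k ih =>
    intro w c v fuel hf hstop
    obtain ⟨fuel, rfl⟩ : ∃ f, fuel = f + 1 := ⟨fuel - 1, by omega⟩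
    have hdecomp : (w ++ [c]) ++ List.replicate (k + 1) '0' ++ v
        = (w ++ [c] ++ List.replicate k '0') ++ '0' :: v := by
      simp [List.replicate_succ']
    have hlen : ((w.length + (k + 1) : Nat) : Int)
        = ((w ++ [c] ++ List.replicate k '0').length : Int) := by
      simp only [List.length_append, List.length_replicate, List.length_cons, List.length_nil]
      omega
    rw [hdecomp, hlen, tmLoop, pyGet_mid]
    simp only []
    rw [show cmdMap.get? ('0', 1) = some ('1', some (-1), 1) from by decide]
    simp only []
    rw [pySetD_mid]
    have hidx : ((w ++ [c] ++ List.replicate k '0').length : Int) + (-1)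
        = ((w.length + k : Nat) : Int) := by
      simp only [List.length_append, List.length_replicate, List.length_cons, List.length_nil]
      omega
    rw [hidx]
    rw [show (w ++ [c] ++ List.replicate k '0') ++ '1' :: v
        = (w ++ [c]) ++ List.replicate k '0' ++ ('1' :: v) from by simp]
    rw [ih w c ('1' :: v) fuel (by omega) hstop]
    simp [List.replicate_succ']

-- the run on an all-'0' input (the machine halts on the leading blank)
theorem runA (k fuel : Nat) (hf : k < fuel) :
    tmLoop fuel ((' ' :: List.replicate k '0') ++ [' ']) ((k : Nat) : Int) 1
      = ' ' :: (List.replicate k '1' ++ [' ']) := by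
  have h := loop1 k [] ' ' [' '] fuel hf (Or.inr rfl)
  simpa using h

-- the run when the rightmost non-'0' char a (preceded by t, followed by k zeros) stops the machine
theorem runB (t : List Char) (a : Char) (k fuel : Nat) (hf : k < fuel) (ha : a = '1' ∨ a = ' ') :
    tmLoop fuel ((' ' :: ((t ++ [a]) ++ List.replicate k '0')) ++ [' '])
        ((t.length + 1 + k : Nat) : Int) 1
      = ' ' :: (t ++ (if a = '1' then '0' else a) :: (List.replicate k '1' ++ [' '])) := by
  have h := loop1 k (' ' :: t) a [' '] fuel hf ha
  simpa using h

-- rstrip decomposition: l = stripped ++ zeros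
theorem rstrip_decomp (l : List Char) :
    l = (l.reverse.dropWhile (· = '0')).reverse
        ++ List.replicate (l.length - (l.reverse.dropWhile (· = '0')).reverse.length) '0' := by
  conv_lhs => rw [← l.reverse_reverse, ← List.takeWhile_append_dropWhile (p := (· = '0')) (l := l.reverse)]
  rw [List.reverse_append]
  congr 1
  have hall : ∀ c ∈ (l.reverse.takeWhile (· = '0')).reverse, c = '0' := by
    intro c hc
    have := List.mem_takeWhile_imp (List.mem_reverse.mp hc)
    simpa using this
  rw [List.eq_replicate_iff.mpr ⟨rfl, hall⟩]
  congr 1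
  have hlen := congrArg List.length (List.takeWhile_append_dropWhile (p := (· = '0')) (l := l.reverse))
  simp only [List.length_append, List.length_reverse] at hlen
  simp
  omega

theorem tm_eq_alt (n : String) (hpre : Pre_tm n) : tm n = tm_alt n := by
  unfold Pre_tm at hpre
  show String.ofList
      (tmLoop (((' ' :: n.toList) ++ [' ']).length + 1) ((' ' :: n.toList) ++ [' '])
        ((((' ' :: n.toList) ++ [' ']).length : Int) - 1) 0)
    = (match ((n.toList.reverse.dropWhile (· = '0')).reverse).getLast? with
       | none => String.ofList (' ' ::
           (List.replicate (n.toList.length - (n.toList.reverse.dropWhile (· = '0')).reverse.length) '1' ++ [' ']))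
       | some c => String.ofList (' ' ::
           ((n.toList.reverse.dropWhile (· = '0')).reverse.dropLast ++ (if c = '1' then '0' else c) ::
             (List.replicate (n.toList.length - (n.toList.reverse.dropWhile (· = '0')).reverse.length) '1' ++ [' ']))))
  set l := n.toList with hl
  -- first machine step: state 0 on the trailing blank, move left into state 1
  rw [show ((((' ' :: l) ++ [' ']).length : Int) - 1) = (((' ' :: l).length : Nat) : Int) from by
    simp]
  rw [tmLoop, pyGet_mid]
  simp only []
  rw [show cmdMap.get? (' ', 0) = some (' ', some (-1), 1) from by decide]
  simp only []
  rw [pySetD_mid]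
  rw [show (((' ' :: l).length : Nat) : Int) + (-1) = ((l.length : Nat) : Int) from by
    simp]
  cases hx : l.reverse.dropWhile (· = '0') with
  | nil =>
    have hdec := rstrip_decomp l
    rw [hx] at hdec
    simp only [List.reverse_nil, List.length_nil, Nat.sub_zero, List.nil_append,
      List.getLast?_nil] at hdec ⊢
    obtain ⟨m, hm⟩ : ∃ m, l.length = m := ⟨_, rfl⟩
    rw [hm] at hdec ⊢
    rw [hdec]
    refine congrArg String.ofList ?_
    have h := runA m (((' ' :: List.replicate m '0') ++ [' ']).length) (by simp)
    simpa using h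
  | cons a t =>
    have hdec := rstrip_decomp l
    rw [hx] at hdec hpre
    simp only [List.headD_cons] at hpre
    simp only [List.reverse_cons, List.getLast?_concat, List.length_append,
      List.length_reverse, List.length_cons, List.length_nil, Nat.zero_add,
      List.dropLast_concat] at hdec ⊢
    obtain ⟨k, hk⟩ : ∃ k, l.length - (t.length + 1) = k := ⟨_, rfl⟩
    rw [hk] at hdec ⊢
    have hm : l.length = t.length + 1 + k := by
      have := congrArg List.length hdec
      simp at this
      omega
    rw [hm, hdec]
    refine congrArg String.ofList ?_
    have h := runB t.reverse a k (t.length + 1 + k + 1 + 1) (by omega) hpre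
    simpa using h
-- ===== VERDICT (by name: the statement is the Claim_ definition above) =====
theorem tm_spec : Claim_equal_tm := by
  intro n _ hpre
  unfold Spec_tm
  exact (tm_eq_alt n hpre).symm ▸ rfl
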